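-- pv_equiv track=rewrite | github.com/Delayed-Gitification/nano_tools | shared_functions.py | get_flags
-- ===== SOURCE A (Python) =====
-- def get_flags(flag):
-- 	"""
-- 	Creates a human-interpretable string for a given sam flag
-- 	"""
-- 	if flag == 0:
-- 		return ""
-- 	# Convert to binary representation
-- 	bin_string = bin(flag)[2:]
--
-- 	components = []
-- 	for i, one_or_zero in enumerate(bin_string[::-1]):
-- 		if one_or_zero == "1":
-- 			components.append(2**int(i))
--
-- 	flag_list = []
-- 	if 1 in components:
-- 		flag_list.append("read paired")
--
-- 	if 2 in components:
-- 		flag_list.append("read mapped in proper pair")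
--
-- 	if 4 in components:
-- 		flag_list.append("read unmapped")
--
-- 	if 8 in components:
-- 		flag_list.append("mate unmapped")
--
-- 	if 16 in components:
-- 		flag_list.append("read reverse strand")
--
-- 	if 32 in components:
-- 		flag_list.append("mate reverse strand")
--
-- 	if 64 in components:
-- 		flag_list.append("first in pair")
--
-- 	if 128 in components:
-- 		flag_list.append("second in pair")
--
-- 	if 256 in components:
-- 		flag_list.append("not primary alignment")
--
-- 	if 512 in components:
-- 		flag_list.append("read fails platform or vendor quality checks")
--
-- 	if 1024 in components:
-- 		flag_list.append("read is PCR or optical duplicate")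
--
-- 	if 2048 in components:
-- 		flag_list.append("supplementary alignment")
--
-- 	return "; ".join(flag_list)
-- ===== SOURCE B (Python) =====
-- SAM_FLAGS = [
--     (1, "read paired"),
--     (2, "read mapped in proper pair"),
--     (4, "read unmapped"),
--     (8, "mate unmapped"),
--     (16, "read reverse strand"),
--     (32, "mate reverse strand"),
--     (64, "first in pair"),
--     (128, "second in pair"),
--     (256, "not primary alignment"),
--     (512, "read fails platform or vendor quality checks"),
--     (1024, "read is PCR or optical duplicate"),
--     (2048, "supplementary alignment"),
-- ]
--
--
-- def get_flags(flag):
--     """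
--     Creates a human-interpretable string for a given sam flag
--     """
--     return "; ".join(label for bit, label in SAM_FLAGS if flag & bit)
-- ===== Notes on version B (the rewrite author's own statement) =====
-- stated objective: idiomatic
-- what changed: Replaces the binary-string decoding (bin()[2:], reversed enumeration into a powers-of-two components list, twelve membership tests) with a fixed (bit, label) table and a single join over the labels whose bit is set by Python's standard test flag & bit.
-- intended difference: On negative flags (never produced by a SAM file) A labels the bits of abs(flag), an accident of its bin()-string slicing, while B labels the bits Python's standard bit test flag & bit sees (two's complement); B's is the intended reading of a bitmask argument. — e.g. on get_flags(-1): A returns "read paired", B returns "read paired; read mapped in proper pair; read unmapped; mate unmapped; read reverse strand; mate reverse strand; first…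
import Mathlib
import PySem

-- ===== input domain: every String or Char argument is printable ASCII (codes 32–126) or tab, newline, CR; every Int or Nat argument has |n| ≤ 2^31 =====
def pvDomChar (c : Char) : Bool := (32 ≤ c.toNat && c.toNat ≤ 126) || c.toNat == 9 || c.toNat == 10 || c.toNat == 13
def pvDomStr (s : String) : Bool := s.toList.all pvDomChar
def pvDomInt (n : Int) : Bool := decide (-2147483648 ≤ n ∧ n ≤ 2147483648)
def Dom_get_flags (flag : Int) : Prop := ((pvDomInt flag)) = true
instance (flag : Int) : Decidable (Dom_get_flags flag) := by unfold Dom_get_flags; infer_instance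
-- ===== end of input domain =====

-- B replaces A's binary-string decode + membership tests with one pass over a fixed (bit, label) table; on negative flags the two differ (see D_).

-- ===== PORT A =====
-- bin(n) for n ≠ 0, hand-ported exactly: '-' for negatives, then "0b", then binary digits high bit first
def pvBinChars (n : Nat) : List Char :=
  if h : n = 0 then [] else pvBinChars (n / 2) ++ [if n % 2 = 1 then '1' else '0']
decreasing_by exact Nat.div_lt_self (Nat.pos_of_ne_zero h) (by norm_num)

-- the components loop: for i, c in enumerate(rev): if c == "1": components.append(2**int(i))
def pvComponents (rev : List Char) : List Int :=
  (PySem.List.enumerate rev).foldl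
    (fun acc p => if p.2 == '1' then acc ++ [(2 : Int) ^ p.1.toNat] else acc) []

-- the twelve membership-guarded appends followed by "; ".join(flag_list)
def pvJoinFlags (components : List Int) : String :=
  PySem.Str.join "; "
    ((if (1 : Int) ∈ components then ["read paired"] else []) ++
     (if (2 : Int) ∈ components then ["read mapped in proper pair"] else []) ++
     (if (4 : Int) ∈ components then ["read unmapped"] else []) ++
     (if (8 : Int) ∈ components then ["mate unmapped"] else []) ++
     (if (16 : Int) ∈ components then ["read reverse strand"] else []) ++
     (if (32 : Int) ∈ components then ["mate reverse strand"] else []) ++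
     (if (64 : Int) ∈ components then ["first in pair"] else []) ++
     (if (128 : Int) ∈ components then ["second in pair"] else []) ++
     (if (256 : Int) ∈ components then ["not primary alignment"] else []) ++
     (if (512 : Int) ∈ components then ["read fails platform or vendor quality checks"] else []) ++
     (if (1024 : Int) ∈ components then ["read is PCR or optical duplicate"] else []) ++
     (if (2048 : Int) ∈ components then ["supplementary alignment"] else []))

def get_flags (flag : Int) : String :=
  if flag = 0 then ""
  else
    -- bin_string = bin(flag)[2:]  (drop 2 = the [2:] slice); bin_string[::-1] = .reverse
    pvJoinFlags (pvComponents
      ((((if flag < 0 then ['-'] else []) ++ ['0', 'b'] ++ pvBinChars flag.natAbs).drop 2).reverse))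

-- ===== PORT B =====
def pvTable : List (Int × String) :=
  [(1, "read paired"),
   (2, "read mapped in proper pair"),
   (4, "read unmapped"),
   (8, "mate unmapped"),
   (16, "read reverse strand"),
   (32, "mate reverse strand"),
   (64, "first in pair"),
   (128, "second in pair"),
   (256, "not primary alignment"),
   (512, "read fails platform or vendor quality checks"),
   (1024, "read is PCR or optical duplicate"),
   (2048, "supplementary alignment")]

-- Python's `flag & bit` on ints is two's-complement bitwise and = Int.land (exact, all ints)
def get_flags_alt (flag : Int) : String :=
  PySem.Str.join "; " ((pvTable.filter (fun p => Int.land flag p.1 != 0)).map Prod.snd)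

-- ===== PRECONDITION & SPEC =====
-- On negative flags (never produced by a SAM file) A labels the bits of abs(flag), an accident of its
-- bin()-string slicing, while B labels the bits Python's standard bit test `flag & bit` sees (two's
-- complement); B's is the intended reading of a bitmask argument.
def D_get_flags (flag : Int) : Prop := flag < 0
instance (flag : Int) : Decidable (D_get_flags flag) := by unfold D_get_flags; infer_instance

def Spec_get_flags (flag : Int) (out : String) : Prop := ¬ D_get_flags flag → out = get_flags_alt flag
instance (flag : Int) (out : String) : Decidable (Spec_get_flags flag out) := by unfold Spec_get_flags; infer_instance

def pvDiffWitness_get_flags : Int := (-1)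
def pvDiffWitnessOut_get_flags : String × String :=
  ("read paired",
   "read paired; read mapped in proper pair; read unmapped; mate unmapped; read reverse strand; mate reverse strand; first in pair; second in pair; not primary alignment; read fails platform or vendor quality checks; read is PCR or optical duplicate; supplementary alignment")

-- ===== CLAIM (what is proved, stated in full; the proofs are below) =====
def Claim_unchanged_get_flags : Prop := ∀ (flag : Int), Dom_get_flags flag → Spec_get_flags flag (get_flags flag)
def Claim_changed_get_flags : Prop := Dom_get_flags (pvDiffWitness_get_flags) ∧ D_get_flags (pvDiffWitness_get_flags) ∧ get_flags (pvDiffWitness_get_flags) = pvDiffWitnessOut_get_flags.1 ∧ get_flags_alt (pvDiffWitness_get_flags) = pvDiffWitnessOut_get_flags.2 ∧ pvDiffWitnessOut_get_flags.1 ≠ pvDiffWitnessOut_get_flags.2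

-- ===== LEMMAS AND PROOFS =====

theorem pv_ldiff_zero (k : Nat) : Nat.ldiff k 0 = k :=
  Nat.eq_of_testBit_eq (fun i => by simp [Nat.testBit_ldiff])

theorem pv_land_neg_one (k : Nat) : (-1 : Int).land (Int.ofNat k) = Int.ofNat k := by
  show Int.ofNat (Nat.ldiff k 0) = Int.ofNat k
  rw [pv_ldiff_zero]

theorem pv_bit_cond (m k : Nat) : (Int.land (m : Int) ((2 : Int) ^ k) != 0) = m.testBit k := by
  have h : ((2 : Int) ^ k) = (((2 ^ k : Nat)) : Int) := by push_cast; ring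
  rw [h]
  show ((((m &&& 2 ^ k : Nat)) : Int) != 0) = m.testBit k
  rw [Nat.and_two_pow]
  cases hh : m.testBit k <;> simp

theorem pv_binChars_rev_get (m k : Nat) :
    ((pvBinChars m).reverse)[k]? = some '1' ↔ m.testBit k := by
  induction m using Nat.strong_induction_on generalizing k with
  | _ m ih =>
    rw [pvBinChars]
    by_cases h : m = 0
    · simp [h]
    · rw [dif_neg h, List.reverse_append]
      cases k with
      | zero =>
        simp only [List.reverse_cons, List.reverse_nil, List.nil_append, List.cons_append,
          List.getElem?_cons_zero, Nat.testBit_zero]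
        rcases Nat.mod_two_eq_zero_or_one m with h2 | h2 <;> simp [h2]
      | succ k =>
        simp only [List.reverse_cons, List.reverse_nil, List.nil_append, List.cons_append,
          List.getElem?_cons_succ, Nat.testBit_succ]
        exact ih (m / 2) (Nat.div_lt_self (Nat.pos_of_ne_zero h) (by norm_num)) k

theorem pv_mem_components (rev : List Char) (k : Nat) :
    (2 : Int) ^ k ∈ pvComponents rev ↔ rev[k]? = some '1' := by
  unfold pvComponents
  rw [PySem.List.foldl_append_if]
  simp only [List.nil_append, List.mem_map, List.mem_filter]
  constructor
  · rintro ⟨p, ⟨hp, h1⟩, hpow⟩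
    rw [PySem.List.mem_enumerate_iff] at hp
    obtain ⟨j, hj, rfl⟩ := hp
    simp only [zero_add, Int.toNat_natCast] at hpow h1
    have hjk : j = k := by
      have hc : ((2 ^ j : Nat) : Int) = ((2 ^ k : Nat) : Int) := by push_cast; exact hpow
      exact Nat.pow_right_injective (le_refl 2) (Int.natCast_inj.mp hc)
    subst hjk
    simp only [beq_iff_eq] at h1
    simp [List.getElem?_eq_getElem hj, h1]
  · intro h
    have hk : k < rev.length := by
      by_contra hk
      simp [List.getElem?_eq_none (by omega : rev.length ≤ k)] at h
    refine ⟨((k : Int), rev[k]), ⟨?_, ?_⟩, ?_⟩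
    · rw [PySem.List.mem_enumerate_iff]; exact ⟨k, hk, by simp⟩
    · have h1 : rev[k] = '1' := by
        rw [List.getElem?_eq_getElem hk] at h; exact Option.some.inj h
      simp [h1]
    · simp

-- the characters A's loop actually walks: for flag ≠ 0, bit k of bin(flag)[2:][::-1] is '1' iff |flag| has bit k
theorem pv_revA (flag : Int) (k : Nat) :
    ((((if flag < 0 then ['-'] else []) ++ ['0', 'b'] ++ pvBinChars flag.natAbs).drop 2).reverse)[k]?
      = some '1' ↔ flag.natAbs.testBit k := by
  by_cases hneg : flag < 0
  · rw [if_pos hneg]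
    show (((('-' :: '0' :: 'b' :: pvBinChars flag.natAbs)).drop 2).reverse)[k]? = some '1' ↔ _
    simp only [List.drop_succ_cons, List.drop_zero, List.reverse_cons]
    rw [← pv_binChars_rev_get flag.natAbs k]
    rcases Nat.lt_or_ge k (pvBinChars flag.natAbs).reverse.length with hlt | hge
    · rw [List.getElem?_append_left hlt]
    · rw [List.getElem?_append_right hge,
        List.getElem?_eq_none (hge : (pvBinChars flag.natAbs).reverse.length ≤ k)]
      constructor
      · intro h
        rcases Nat.lt_or_ge (k - (pvBinChars flag.natAbs).reverse.length) 1 with h0 | h0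
        · have h00 : k - (pvBinChars flag.natAbs).reverse.length = 0 := by omega
          rw [h00] at h
          simp at h
        · rw [List.getElem?_eq_none (by simpa using h0)] at h
          simp at h
      · intro h; simp at h
  · rw [if_neg hneg]
    show ((('0' :: 'b' :: pvBinChars flag.natAbs)).drop 2).reverse[k]? = some '1' ↔ _
    simp only [List.drop_succ_cons, List.drop_zero]
    exact pv_binChars_rev_get flag.natAbs k

theorem pv_filter_map_cons {α β : Type} (g : α → β) (f : α → Bool) (a : α) (l : List α) :
    ((a :: l).filter f).map g = (if f a then [g a] else []) ++ (l.filter f).map g := by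
  by_cases h : f a <;> simp [h]

theorem pv_main (flag : Int) (hpre : 0 ≤ flag) : get_flags flag = get_flags_alt flag := by
  obtain ⟨m, rfl⟩ : ∃ m : Nat, flag = (m : Int) := ⟨flag.toNat, (Int.toNat_of_nonneg hpre).symm⟩
  by_cases hf : (m : Int) = 0
  · rw [hf]; decide
  · unfold get_flags get_flags_alt
    rw [if_neg hf]
    simp only [Int.natAbs_natCast]
    have hmem : ∀ k : Nat,
        ((2 : Int) ^ k ∈ pvComponents
          ((((if (m : Int) < 0 then ['-'] else []) ++ ['0', 'b'] ++ pvBinChars (m : Int).natAbs).drop 2).reverse))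
          = ((m : Int).natAbs.testBit k = true) :=
      fun k => propext ((pv_mem_components _ k).trans (pv_revA (m : Int) k))
    have habs : (m : Int).natAbs = m := Int.natAbs_natCast m
    rw [habs] at hmem
    have e0 := hmem 0; rw [show ((2:Int)^0) = 1 by norm_num] at e0
    have e1 := hmem 1; rw [show ((2:Int)^1) = 2 by norm_num] at e1
    have e2 := hmem 2; rw [show ((2:Int)^2) = 4 by norm_num] at e2
    have e3 := hmem 3; rw [show ((2:Int)^3) = 8 by norm_num] at e3
    have e4 := hmem 4; rw [show ((2:Int)^4) = 16 by norm_num] at e4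
    have e5 := hmem 5; rw [show ((2:Int)^5) = 32 by norm_num] at e5
    have e6 := hmem 6; rw [show ((2:Int)^6) = 64 by norm_num] at e6
    have e7 := hmem 7; rw [show ((2:Int)^7) = 128 by norm_num] at e7
    have e8 := hmem 8; rw [show ((2:Int)^8) = 256 by norm_num] at e8
    have e9 := hmem 9; rw [show ((2:Int)^9) = 512 by norm_num] at e9
    have e10 := hmem 10; rw [show ((2:Int)^10) = 1024 by norm_num] at e10
    have e11 := hmem 11; rw [show ((2:Int)^11) = 2048 by norm_num] at e11
    have b0 := pv_bit_cond m 0; rw [show ((2:Int)^0) = 1 by norm_num] at b0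
    have b1 := pv_bit_cond m 1; rw [show ((2:Int)^1) = 2 by norm_num] at b1
    have b2 := pv_bit_cond m 2; rw [show ((2:Int)^2) = 4 by norm_num] at b2
    have b3 := pv_bit_cond m 3; rw [show ((2:Int)^3) = 8 by norm_num] at b3
    have b4 := pv_bit_cond m 4; rw [show ((2:Int)^4) = 16 by norm_num] at b4
    have b5 := pv_bit_cond m 5; rw [show ((2:Int)^5) = 32 by norm_num] at b5
    have b6 := pv_bit_cond m 6; rw [show ((2:Int)^6) = 64 by norm_num] at b6
    have b7 := pv_bit_cond m 7; rw [show ((2:Int)^7) = 128 by norm_num] at b7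
    have b8 := pv_bit_cond m 8; rw [show ((2:Int)^8) = 256 by norm_num] at b8
    have b9 := pv_bit_cond m 9; rw [show ((2:Int)^9) = 512 by norm_num] at b9
    have b10 := pv_bit_cond m 10; rw [show ((2:Int)^10) = 1024 by norm_num] at b10
    have b11 := pv_bit_cond m 11; rw [show ((2:Int)^11) = 2048 by norm_num] at b11
    simp only [List.append_assoc] at e0 e1 e2 e3 e4 e5 e6 e7 e8 e9 e10 e11
    unfold pvJoinFlags pvTable
    simp only [pv_filter_map_cons, List.filter_nil, List.map_nil, List.append_nil,
      List.append_assoc, b0, b1, b2, b3, b4, b5, b6, b7, b8, b9, b10, b11,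
      e0, e1, e2, e3, e4, e5, e6, e7, e8, e9, e10, e11]

-- ===== VERDICT (by name: the statements are the Claim_ definitions above) =====
theorem get_flags_spec : Claim_unchanged_get_flags := by
  intro flag _
  unfold Spec_get_flags D_get_flags
  intro hnd
  exact pv_main flag (by omega)

set_option maxRecDepth 65536 in
theorem get_flags_changed : Claim_changed_get_flags := by
  unfold Claim_changed_get_flags
  refine ⟨by decide, by decide, ?_, ?_, by decide⟩
  · have h1 : pvBinChars 1 = ['1'] := by rw [pvBinChars, pvBinChars]; norm_num
    simp [get_flags, pvJoinFlags, pvComponents, h1, PySem.List.enumerate,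
      pvDiffWitness_get_flags, pvDiffWitnessOut_get_flags]
    decide
  · show get_flags_alt (-1) = pvDiffWitnessOut_get_flags.2
    simp only [get_flags_alt, pvTable, pvDiffWitnessOut_get_flags, List.filter_cons,
      show ((-1:Int).land 1) = 1 from pv_land_neg_one 1,
      show ((-1:Int).land 2) = 2 from pv_land_neg_one 2,
      show ((-1:Int).land 4) = 4 from pv_land_neg_one 4,
      show ((-1:Int).land 8) = 8 from pv_land_neg_one 8,
      show ((-1:Int).land 16) = 16 from pv_land_neg_one 16,
      show ((-1:Int).land 32) = 32 from pv_land_neg_one 32,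
      show ((-1:Int).land 64) = 64 from pv_land_neg_one 64,
      show ((-1:Int).land 128) = 128 from pv_land_neg_one 128,
      show ((-1:Int).land 256) = 256 from pv_land_neg_one 256,
      show ((-1:Int).land 512) = 512 from pv_land_neg_one 512,
      show ((-1:Int).land 1024) = 1024 from pv_land_neg_one 1024,
      show ((-1:Int).land 2048) = 2048 from pv_land_neg_one 2048]
    norm_num
    decide
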